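-- pv_equiv track=rewrite | github.com/Jayluci4/kernel_agent_training_pipeline | pipeline/rl/policy.py | get_action_mask
-- ===== SOURCE A (Python) =====
-- ACTION_NAMES = [
--     "vec_ld", "vec_st",
--     "cache_cs", "cache_cg", "cache_ca", "cache_cv",
--     "st_cache_cs", "st_cache_wt", "st_cache_wb",
--     "maxnreg_32", "maxnreg_64", "maxnreg_128", "maxnreg_255",
--     "reorder_cp", "reorder_il", "reorder_lf", "reorder_sl",
--     "prefetch_L1", "prefetch_L2",
--     "split_ld",
--     "stop",
-- ]
--
-- CONFLICT_GROUPS = {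
--     "cache_hints": {"cache_cs", "cache_cg", "cache_ca", "cache_cv"},
--     "store_cache_hints": {"st_cache_cs", "st_cache_wt", "st_cache_wb"},
--     "register_budget": {"maxnreg_32", "maxnreg_64", "maxnreg_128", "maxnreg_255"},
--     "prefetch": {"prefetch_L1", "prefetch_L2"},
--     "reorder": {"reorder_cp", "reorder_il", "reorder_lf", "reorder_sl"},
-- }
--
-- def get_action_mask(applied_set):
--     """Return binary mask of available actions given applied transforms.
--
--     applied_set: set of action label strings already applied.
--     Returns: list of 21 ints (0 or 1).
--     """
--     mask = []
--     for label in ACTION_NAMES: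
--         if label == "stop":
--             mask.append(1)
--             continue
--         if label in applied_set:
--             mask.append(0)
--             continue
--         conflict = False
--         for group_labels in CONFLICT_GROUPS.values():
--             if label in group_labels and applied_set & group_labels:
--                 conflict = True
--                 break
--         mask.append(0 if conflict else 1)
--     return mask
-- ===== SOURCE B (Python) =====
-- ACTION_NAMES = [
--     "vec_ld", "vec_st",
--     "cache_cs", "cache_cg", "cache_ca", "cache_cv",
--     "st_cache_cs", "st_cache_wt", "st_cache_wb",
--     "maxnreg_32", "maxnreg_64", "maxnreg_128", "maxnreg_255",
--     "reorder_cp", "reorder_il", "reorder_lf", "reorder_sl",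
--     "prefetch_L1", "prefetch_L2",
--     "split_ld",
--     "stop",
-- ]
--
-- CONFLICT_GROUPS = {
--     "cache_hints": {"cache_cs", "cache_cg", "cache_ca", "cache_cv"},
--     "store_cache_hints": {"st_cache_cs", "st_cache_wt", "st_cache_wb"},
--     "register_budget": {"maxnreg_32", "maxnreg_64", "maxnreg_128", "maxnreg_255"},
--     "prefetch": {"prefetch_L1", "prefetch_L2"},
--     "reorder": {"reorder_cp", "reorder_il", "reorder_lf", "reorder_sl"},
-- }
--
-- def get_action_mask(applied_set):
--     """Return binary mask of available actions given applied transforms."""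
--     blocked = set()
--     for group_labels in CONFLICT_GROUPS.values():
--         if applied_set & group_labels:
--             blocked |= group_labels
--     blocked |= applied_set
--     return [1 if label == "stop" else (0 if label in blocked else 1)
--             for label in ACTION_NAMES]
-- ===== Notes on version B (the rewrite author's own statement) =====
-- stated objective: simpler
-- what changed: B precomputes one 'blocked' set (union of every conflict group that intersects applied_set, plus applied_set itself) and then emits the mask in one flat comprehension, instead of A's per-label inner rescan of all conflict groups.
import Mathlib
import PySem

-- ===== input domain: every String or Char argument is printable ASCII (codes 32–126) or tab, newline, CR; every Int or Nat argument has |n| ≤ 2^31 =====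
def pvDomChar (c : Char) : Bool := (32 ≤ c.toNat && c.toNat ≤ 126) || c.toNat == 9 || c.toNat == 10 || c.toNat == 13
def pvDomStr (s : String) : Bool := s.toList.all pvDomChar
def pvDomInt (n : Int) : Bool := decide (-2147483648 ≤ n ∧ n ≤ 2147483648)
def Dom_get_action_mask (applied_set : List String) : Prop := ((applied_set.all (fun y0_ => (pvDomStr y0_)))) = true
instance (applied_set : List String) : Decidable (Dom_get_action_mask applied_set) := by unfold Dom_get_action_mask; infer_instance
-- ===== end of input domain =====

-- B builds one 'blocked' set once and emits the mask in a single flat pass,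
-- instead of A's per-label rescan of all conflict groups (objective: simpler).


-- shared module constants (both Pythons carry the same literals)
def pvActionNames : List String :=
  ["vec_ld", "vec_st",
   "cache_cs", "cache_cg", "cache_ca", "cache_cv",
   "st_cache_cs", "st_cache_wt", "st_cache_wb",
   "maxnreg_32", "maxnreg_64", "maxnreg_128", "maxnreg_255",
   "reorder_cp", "reorder_il", "reorder_lf", "reorder_sl",
   "prefetch_L1", "prefetch_L2",
   "split_ld",
   "stop"]

-- CONFLICT_GROUPS: dict of sets, as an insertion-order assoc list of distinct-element lists
def pvConflictGroups : List (String × List String) :=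
  [("cache_hints", ["cache_cs", "cache_cg", "cache_ca", "cache_cv"]),
   ("store_cache_hints", ["st_cache_cs", "st_cache_wt", "st_cache_wb"]),
   ("register_budget", ["maxnreg_32", "maxnreg_64", "maxnreg_128", "maxnreg_255"]),
   ("prefetch", ["prefetch_L1", "prefetch_L2"]),
   ("reorder", ["reorder_cp", "reorder_il", "reorder_lf", "reorder_sl"])]

-- ===== PORT A =====
-- 'applied_set & group_labels' is truthy iff some element of applied_set is in the group — exact.
def get_action_mask (applied_set : List String) : List Int :=
  pvActionNames.foldl (fun mask label =>
    if label == "stop" then mask ++ [1]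
    else if applied_set.contains label then mask ++ [0]
    else
      -- inner for-loop with break = List.any over CONFLICT_GROUPS.values()
      let conflict := pvConflictGroups.any (fun g =>
        g.2.contains label && applied_set.any (fun x => g.2.contains x))
      mask ++ [if conflict then 0 else 1]) []

-- ===== PORT B =====
-- blocked = union of every conflict group intersecting applied_set, then |= applied_set
def get_action_mask_alt (applied_set : List String) : List Int :=
  let blocked : PySem.Set String := pvConflictGroups.foldl (fun b g =>
    if applied_set.any (fun x => g.2.contains x) then PySem.Set.union b g.2 else b)
    PySem.Set.empty
  let blocked := PySem.Set.union blocked applied_set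
  pvActionNames.map (fun label =>
    if label == "stop" then (1 : Int)
    else if PySem.Set.contains blocked label then 0 else 1)

-- ===== PRECONDITION & SPEC =====
def Spec_get_action_mask (applied_set : List String) (out : List Int) : Prop := out = get_action_mask_alt applied_set
instance (applied_set : List String) (out : List Int) : Decidable (Spec_get_action_mask applied_set out) := by unfold Spec_get_action_mask; infer_instance

-- ===== CLAIM (what is proved, stated in full; the proofs are below) =====
def Claim_equal_get_action_mask : Prop := ∀ (applied_set : List String), Dom_get_action_mask applied_set → Spec_get_action_mask applied_set (get_action_mask applied_set)

-- ===== LEMMAS AND PROOFS =====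

-- membership in B's blocked-accumulating fold
theorem mem_blocked_foldl (applied : List String) (gs : List (String × List String))
    (s : PySem.Set String) (y : String) :
    (y ∈ gs.foldl (fun b g =>
        if applied.any (fun x => g.2.contains x) then PySem.Set.union b g.2 else b) s) ↔
    y ∈ s ∨ ∃ g ∈ gs, applied.any (fun x => g.2.contains x) ∧ y ∈ g.2 := by
  induction gs generalizing s with
  | nil => simp
  | cons g gs ih =>
    simp only [List.foldl_cons]
    split_ifs with hc
    · rw [ih]
      simp only [PySem.Set.mem_union, List.mem_cons]
      constructor
      · rintro ((h | h) | ⟨g', hg', h⟩)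
        · exact Or.inl h
        · exact Or.inr ⟨g, Or.inl rfl, hc, h⟩
        · exact Or.inr ⟨g', Or.inr hg', h⟩
      · rintro (h | ⟨g', (rfl | hg'), hcond, h⟩)
        · exact Or.inl (Or.inl h)
        · exact Or.inl (Or.inr h)
        · exact Or.inr ⟨g', hg', hcond, h⟩
    · rw [ih]
      simp only [List.mem_cons]
      constructor
      · rintro (h | ⟨g', hg', h⟩)
        · exact Or.inl h
        · exact Or.inr ⟨g', Or.inr hg', h⟩
      · rintro (h | ⟨g', (rfl | hg'), hcond, h⟩)
        · exact Or.inl h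
        · exact absurd hcond hc
        · exact Or.inr ⟨g', hg', hcond, h⟩

-- A's fold with appends is the map of the per-label bit
theorem foldA_eq_map (applied : List String) (labels : List String) (acc : List Int) :
    labels.foldl (fun mask label =>
      if label == "stop" then mask ++ [1]
      else if applied.contains label then mask ++ [0]
      else
        let conflict := pvConflictGroups.any (fun g =>
          g.2.contains label && applied.any (fun x => g.2.contains x))
        mask ++ [if conflict then 0 else 1]) acc
    = acc ++ labels.map (fun label =>
        if label == "stop" then (1 : Int)
        else if applied.contains label then 0
        else if pvConflictGroups.any (fun g =>
          g.2.contains label && applied.any (fun x => g.2.contains x)) then 0 else 1) := by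
  induction labels generalizing acc with
  | nil => simp
  | cons l ls ih =>
    simp only [List.foldl_cons, List.map_cons]
    split_ifs with h1 h2 h3 <;> rw [ih, List.append_assoc] <;> rfl

-- the per-label bits agree
theorem bit_eq (applied : List String) (label : String) :
    (if label == "stop" then (1 : Int)
     else if applied.contains label then 0
     else if pvConflictGroups.any (fun g =>
       g.2.contains label && applied.any (fun x => g.2.contains x)) then 0 else 1)
    = (if label == "stop" then (1 : Int)
       else if PySem.Set.contains
          (PySem.Set.union (pvConflictGroups.foldl (fun b g =>
            if applied.any (fun x => g.2.contains x) then PySem.Set.union b g.2 else b)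
            PySem.Set.empty) applied) label then 0 else 1) := by
  have hmem : PySem.Set.contains
      (PySem.Set.union (pvConflictGroups.foldl (fun b g =>
        if applied.any (fun x => g.2.contains x) then PySem.Set.union b g.2 else b)
        PySem.Set.empty) applied) label = true
      ↔ label ∈ applied ∨ ∃ g ∈ pvConflictGroups,
          (applied.any (fun x => g.2.contains x)) = true ∧ label ∈ g.2 := by
    rw [PySem.Set.contains_iff, PySem.Set.mem_union, mem_blocked_foldl]
    simp [PySem.Set.empty, or_comm]
  by_cases hs : (label == "stop") = true
  · rw [if_pos hs, if_pos hs]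
  · rw [if_neg hs, if_neg hs]
    by_cases ha : applied.contains label = true
    · rw [if_pos ha, if_pos (hmem.mpr (Or.inl (by simpa using ha)))]
    · rw [if_neg ha]
      by_cases hc : (pvConflictGroups.any (fun g =>
          g.2.contains label && applied.any (fun x => g.2.contains x))) = true
      · have hb : PySem.Set.contains _ label = true := hmem.mpr (Or.inr (by
          simp only [List.any_eq_true, Bool.and_eq_true] at hc
          obtain ⟨g, hg, h1, h2⟩ := hc
          exact ⟨g, hg, by simpa using h2, by simpa using h1⟩))
        rw [if_pos hc, if_pos hb]
      · have hb : ¬ PySem.Set.contains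
            (PySem.Set.union (pvConflictGroups.foldl (fun b g =>
              if applied.any (fun x => g.2.contains x) then PySem.Set.union b g.2 else b)
              PySem.Set.empty) applied) label = true := by
          intro h
          rcases hmem.mp h with h | ⟨g, hg, h1, h2⟩
          · exact ha (by simpa using h)
          · exact hc (by
              simp only [List.any_eq_true, Bool.and_eq_true]
              exact ⟨g, hg, by simpa using h2, by simpa using h1⟩)
        rw [if_neg hc, if_neg hb]

-- ===== VERDICT (by name: the statement is the Claim_ definition above) =====
theorem get_action_mask_spec : Claim_equal_get_action_mask := by
  intro applied _
  show get_action_mask applied = get_action_mask_alt applied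
  unfold get_action_mask
  rw [foldA_eq_map]
  simp only [get_action_mask_alt, List.nil_append]
  exact List.map_congr_left (fun label _ => bit_eq applied label)
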